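-- pv_equiv track=rewrite | github.com/Pranathi-star/Data-Structures-and-Algos-in-Python---practice | greedy_algorithms/max_num_of_prizes.py | rep_k_distinct_terms
-- ===== SOURCE A (Python) =====
-- def rep_k_distinct_terms(no_prizes):
--     res = []
--     for i in range(1, no_prizes):
--         if no_prizes > 2 * i:
--             res.append(i)
--             no_prizes -= i
--         else:
--             res.append(no_prizes)
--             break
--     return res
-- ===== SOURCE B (Python) =====
-- def rep_k_distinct_terms(no_prizes):
--     if no_prizes <= 0:
--         return []
--     n = no_prizes
--     # binary search for the smallest m >= 1 with m*m + 3*m >= 2*n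
--     lo, hi = 1, n
--     while lo < hi:
--         mid = (lo + hi) // 2
--         if mid * mid + 3 * mid >= 2 * n:
--             hi = mid
--         else:
--             lo = mid + 1
--     m = lo
--     return list(range(1, m)) + [n - (m - 1) * m // 2]
-- ===== Notes on version B (the rewrite author's own statement) =====
-- stated objective: alternative
-- what changed: Replaces the greedy subtract-and-append loop by a closed form: binary-search the break index m (smallest m with m*m+3*m >= 2*n), then build range(1,m) plus the final remainder n-(m-1)*m//2 directly.
-- intended difference: For no_prizes = 1, A returns [] because range(1,1) is empty, while B returns [1], the intended representation of 1 as one positive term. — e.g. on rep_k_distinct_terms(1): A returns [], B returns [1]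
import Mathlib
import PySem

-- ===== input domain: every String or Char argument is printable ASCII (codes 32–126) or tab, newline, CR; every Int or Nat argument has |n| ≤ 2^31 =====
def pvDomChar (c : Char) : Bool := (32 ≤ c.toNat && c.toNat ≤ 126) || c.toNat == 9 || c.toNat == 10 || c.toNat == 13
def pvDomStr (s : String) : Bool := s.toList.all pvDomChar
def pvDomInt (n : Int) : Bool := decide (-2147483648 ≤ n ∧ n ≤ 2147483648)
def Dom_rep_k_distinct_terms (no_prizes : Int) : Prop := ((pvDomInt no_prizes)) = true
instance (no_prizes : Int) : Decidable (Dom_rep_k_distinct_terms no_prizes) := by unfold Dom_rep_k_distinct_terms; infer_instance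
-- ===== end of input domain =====

-- B replaces A's greedy subtract-and-append loop by a binary search for the break index
-- plus a direct range build (alternative decomposition; B fixes A's value at no_prizes = 1).

-- ===== PORT A =====
-- the for-loop over range(1, no_prizes) with mutable no_prizes and early break
def repA_loop (is : List Int) (np : Int) (res : List Int) : List Int :=
  match is with
  | [] => res
  | i :: rest =>
      if np > 2 * i then repA_loop rest (np - i) (res ++ [i])
      else res ++ [np]

def rep_k_distinct_terms (no_prizes : Int) : List Int :=
  repA_loop (PySem.List.pyRange 1 no_prizes 1) no_prizes []

-- ===== PORT B =====
-- the while-loop 'while lo < hi: …' of Source B (terminates since hi - lo shrinks)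
def repB_bs (lo hi n : Int) : Int :=
  if h : lo < hi then
    let mid := PySem.Int.floordiv (lo + hi) 2
    if mid * mid + 3 * mid ≥ 2 * n then repB_bs lo mid n
    else repB_bs (mid + 1) hi n
  else lo
termination_by (hi - lo).toNat
decreasing_by
  · have := PySem.Int.floordiv_two_mid_bounds (le_of_lt h)
    have hlt : PySem.Int.floordiv (lo + hi) 2 < hi := by
      have : PySem.Int.floordiv (lo + hi) 2 = (lo + hi) / 2 :=
        PySem.Int.floordiv_eq_ediv_of_pos (by norm_num)
      omega
    omega
  · have := PySem.Int.floordiv_two_mid_bounds (le_of_lt h)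
    omega

def rep_k_distinct_terms_alt (no_prizes : Int) : List Int :=
  if no_prizes ≤ 0 then []
  else
    let n := no_prizes
    let m := repB_bs 1 n n
    PySem.List.pyRange 1 m 1 ++ [n - PySem.Int.floordiv ((m - 1) * m) 2]

-- ===== PRECONDITION & SPEC =====
-- For no_prizes = 1, A returns [] because range(1,1) is empty, while B returns [1],
-- the intended representation of 1 as one positive term.
def D_rep_k_distinct_terms (no_prizes : Int) : Prop := no_prizes = 1
instance (no_prizes : Int) : Decidable (D_rep_k_distinct_terms no_prizes) := by
  unfold D_rep_k_distinct_terms; infer_instance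

def Spec_rep_k_distinct_terms (no_prizes : Int) (out : List Int) : Prop :=
  ¬ D_rep_k_distinct_terms no_prizes → out = rep_k_distinct_terms_alt no_prizes
instance (no_prizes : Int) (out : List Int) : Decidable (Spec_rep_k_distinct_terms no_prizes out) := by
  unfold Spec_rep_k_distinct_terms; infer_instance

def pvDiffWitness_rep_k_distinct_terms : Int := 1
def pvDiffWitnessOut_rep_k_distinct_terms : (List Int) × (List Int) := ([], [1])

-- ===== CLAIM =====
def Claim_unchanged_rep_k_distinct_terms : Prop := ∀ (no_prizes : Int), Dom_rep_k_distinct_terms no_prizes → Spec_rep_k_distinct_terms no_prizes (rep_k_distinct_terms no_prizes)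
def Claim_changed_rep_k_distinct_terms : Prop := Dom_rep_k_distinct_terms (pvDiffWitness_rep_k_distinct_terms) ∧ D_rep_k_distinct_terms (pvDiffWitness_rep_k_distinct_terms) ∧ rep_k_distinct_terms (pvDiffWitness_rep_k_distinct_terms) = pvDiffWitnessOut_rep_k_distinct_terms.1 ∧ rep_k_distinct_terms_alt (pvDiffWitness_rep_k_distinct_terms) = pvDiffWitnessOut_rep_k_distinct_terms.2 ∧ pvDiffWitnessOut_rep_k_distinct_terms.1 ≠ pvDiffWitnessOut_rep_k_distinct_terms.2
def Claim_exact_rep_k_distinct_terms : Prop := ∀ (no_prizes : Int), Dom_rep_k_distinct_terms no_prizes → D_rep_k_distinct_terms no_prizes → rep_k_distinct_terms no_prizes ≠ rep_k_distinct_terms_alt no_prizes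

-- ===== LEMMAS AND PROOFS =====

-- the binary search returns the least m ≥ lo with m*m+3*m ≥ 2*n (given P hi and ¬P below lo)
lemma repB_bs_spec_aux (n : Int) : ∀ (fuel : Nat) (lo hi : Int), (hi - lo).toNat ≤ fuel → 1 ≤ lo → lo ≤ hi →
    hi * hi + 3 * hi ≥ 2 * n →
    (∀ j : Int, 1 ≤ j → j < lo → j * j + 3 * j < 2 * n) →
    1 ≤ repB_bs lo hi n ∧ repB_bs lo hi n ≤ hi ∧
    repB_bs lo hi n * repB_bs lo hi n + 3 * repB_bs lo hi n ≥ 2 * n ∧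
    (∀ j : Int, 1 ≤ j → j < repB_bs lo hi n → j * j + 3 * j < 2 * n) := by
  intro fuel
  induction fuel with
  | zero =>
    intro lo hi hf hlo1 hlohi hPhi hmin
    have heq : lo = hi := by omega
    subst heq
    rw [repB_bs]
    simp only [lt_irrefl, dif_neg, not_false_iff]
    exact ⟨hlo1, le_refl _, hPhi, hmin⟩
  | succ f ih =>
    intro lo hi hf hlo1 hlohi hPhi hmin
    rw [repB_bs]
    by_cases h : lo < hi
    · simp only [h, dif_pos]
      have hmid := PySem.Int.floordiv_two_mid_bounds (le_of_lt h)
      have hmide : PySem.Int.floordiv (lo + hi) 2 = (lo + hi) / 2 :=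
        PySem.Int.floordiv_eq_ediv_of_pos (by norm_num)
      set mid := PySem.Int.floordiv (lo + hi) 2 with hm
      have hmlt : mid < hi := by omega
      by_cases hP : mid * mid + 3 * mid ≥ 2 * n
      · simp only [hP, if_pos]
        have h' := ih lo mid (by omega) hlo1 (by omega) hP hmin
        exact ⟨h'.1, le_trans h'.2.1 (le_of_lt hmlt), h'.2.2.1, h'.2.2.2⟩
      · simp only [hP, if_neg, not_false_iff]
        refine ih (mid + 1) hi (by omega) (by omega) (by omega) hPhi ?_
        intro j hj1 hjlt
        by_cases hjm : j < lo
        · exact hmin j hj1 hjm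
        · -- lo ≤ j ≤ mid : monotonicity of j*j+3*j on positives
          have hjmid : j ≤ mid := by omega
          have : j * j + 3 * j ≤ mid * mid + 3 * mid := by nlinarith
          omega
    · simp only [h, dif_neg, not_false_iff]
      have : lo = hi := by omega
      subst this
      exact ⟨hlo1, le_refl _, hPhi, hmin⟩

lemma repB_bs_spec (n lo hi : Int) (hlo1 : 1 ≤ lo) (hlohi : lo ≤ hi)
    (hPhi : hi * hi + 3 * hi ≥ 2 * n)
    (hmin : ∀ j : Int, 1 ≤ j → j < lo → j * j + 3 * j < 2 * n) :
    1 ≤ repB_bs lo hi n ∧ repB_bs lo hi n ≤ hi ∧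
    repB_bs lo hi n * repB_bs lo hi n + 3 * repB_bs lo hi n ≥ 2 * n ∧
    (∀ j : Int, 1 ≤ j → j < repB_bs lo hi n → j * j + 3 * j < 2 * n) :=
  repB_bs_spec_aux n (hi - lo).toNat lo hi (le_refl _) hlo1 hlohi hPhi hmin

-- A's loop, run from index k with remainder np (2*np = 2*n - (k-1)*k), appends k..r-1 then breaks at r
lemma repA_loop_eq (n r : Int) (hn : 2 ≤ n) (hr1 : 1 ≤ r)
    (hPr : r * r + 3 * r ≥ 2 * n)
    (hmin : ∀ j : Int, 1 ≤ j → j < r → j * j + 3 * j < 2 * n) :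
    ∀ (fuel : Nat) (k np : Int) (res : List Int), (r - k).toNat ≤ fuel → 1 ≤ k → k ≤ r →
    2 * np = 2 * n - (k - 1) * k →
    repA_loop (PySem.List.pyRange k n 1) np res =
      res ++ PySem.List.pyRange k r 1 ++ [n - PySem.Int.floordiv ((r - 1) * r) 2] := by
  have hrn : r ≤ n - 1 := by
    by_contra hc
    have h1 : (1 : Int) ≤ n - 1 := by omega
    have := hmin (n - 1) h1 (by omega)
    nlinarith
  have hbreak : ∀ (k np : Int) (res : List Int), k = r → 2 * np = 2 * n - (k - 1) * k →
      repA_loop (PySem.List.pyRange k n 1) np res =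
        res ++ PySem.List.pyRange k r 1 ++ [n - PySem.Int.floordiv ((r - 1) * r) 2] := by
    intro k np res hkr' hnp
    subst hkr'
    have hkn : k < n := by omega
    rw [PySem.List.pyRange_one_cons hkn]
    have hcond : ¬ (np > 2 * k) := by nlinarith
    simp only [repA_loop, hcond, if_neg, not_false_iff]
    have hnpval : np = n - PySem.Int.floordiv ((k - 1) * k) 2 := by
      have h2 : (k - 1) * k = 2 * (n - np) := by omega
      rw [h2, PySem.Int.floordiv_eq_ediv_of_pos (by norm_num)]
      omega
    rw [PySem.List.pyRange_one_eq_nil (le_refl k), hnpval]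
    simp
  intro fuel
  induction fuel with
  | zero =>
    intro k np res hf hk1 hkr hnp
    exact hbreak k np res (by omega) hnp
  | succ f ih =>
    intro k np res hf hk1 hkr hnp
    by_cases hbr : k < r
    · -- condition np > 2*k holds: ¬P k
      have hkn : k < n := by omega
      rw [PySem.List.pyRange_one_cons hkn]
      have hPk := hmin k hk1 hbr
      have hcond : np > 2 * k := by nlinarith
      simp only [repA_loop, hcond, if_pos]
      have step := ih (k + 1) (np - k) (res ++ [k]) (by omega) (by omega) (by omega)
        (by ring_nf; ring_nf at hnp; omega)
      rw [step, PySem.List.pyRange_one_cons hbr]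
      simp
    · exact hbreak k np res (by omega) hnp

lemma repA_one : rep_k_distinct_terms 1 = [] := by
  simp [rep_k_distinct_terms, PySem.List.pyRange_one_eq_nil, repA_loop]

lemma repB_one : rep_k_distinct_terms_alt 1 = [1] := by
  rw [rep_k_distinct_terms_alt]
  have hbs : repB_bs 1 1 1 = 1 := by rw [repB_bs]; simp
  simp [hbs, PySem.List.pyRange_one_eq_nil, PySem.Int.floordiv]

-- ===== VERDICT =====
theorem rep_k_distinct_terms_spec : Claim_unchanged_rep_k_distinct_terms := by
  intro n _ hD
  have hn1 : n ≠ 1 := hD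
  by_cases hn : n ≤ 0
  · -- both sides empty
    rw [rep_k_distinct_terms, rep_k_distinct_terms_alt,
        PySem.List.pyRange_one_eq_nil (by omega)]
    simp [repA_loop, hn]
  · have hn2 : 2 ≤ n := by omega
    have hbs := repB_bs_spec n 1 n (le_refl 1) (by omega) (by nlinarith)
      (fun j hj1 hj2 => by omega)
    obtain ⟨h1, hle, hP, hmin⟩ := hbs
    rw [rep_k_distinct_terms, rep_k_distinct_terms_alt, if_neg (by omega)]
    exact repA_loop_eq n (repB_bs 1 n n) hn2 h1 hP hmin (repB_bs 1 n n - 1).toNat 1 n []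
      (le_refl _) le_rfl h1 (by ring)

theorem rep_k_distinct_terms_changed : Claim_changed_rep_k_distinct_terms := by
  unfold Claim_changed_rep_k_distinct_terms
  refine ⟨by decide, rfl, repA_one, repB_one, by decide⟩

theorem rep_k_distinct_terms_tight : Claim_exact_rep_k_distinct_terms := by
  intro n _ hD
  have : n = 1 := hD
  subst this
  rw [repA_one, repB_one]
  decide
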